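-- pv_equiv track=rewrite | github.com/AlanVek/Proyectos-Viejos-Python | ejercicio1Vekselman.py | propmaysup
-- ===== SOURCE A (Python) =====
-- def propmaysup(superficies,identificadores):
-- 	mayor=superficies[0]
-- 	indice=0
-- 	for i in range (1,len(superficies)):
-- 		if superficies[i]>mayor:
-- 			mayor=superficies[i]
-- 			indice=i
-- 	return ([mayor,identificadores[indice]])
-- ===== SOURCE B (Python) =====
-- def propmaysup(superficies, identificadores):
--     mayor = max(superficies)
--     indice = superficies.index(mayor)
--     return [mayor, identificadores[indice]]
-- ===== Notes on version B (the rewrite author's own statement) =====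
-- stated objective: idiomatic
-- what changed: Replaces the fused index loop tracking a running max and its index with two builtin scans: max() for the value, then list.index() for its first position.
import Mathlib
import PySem

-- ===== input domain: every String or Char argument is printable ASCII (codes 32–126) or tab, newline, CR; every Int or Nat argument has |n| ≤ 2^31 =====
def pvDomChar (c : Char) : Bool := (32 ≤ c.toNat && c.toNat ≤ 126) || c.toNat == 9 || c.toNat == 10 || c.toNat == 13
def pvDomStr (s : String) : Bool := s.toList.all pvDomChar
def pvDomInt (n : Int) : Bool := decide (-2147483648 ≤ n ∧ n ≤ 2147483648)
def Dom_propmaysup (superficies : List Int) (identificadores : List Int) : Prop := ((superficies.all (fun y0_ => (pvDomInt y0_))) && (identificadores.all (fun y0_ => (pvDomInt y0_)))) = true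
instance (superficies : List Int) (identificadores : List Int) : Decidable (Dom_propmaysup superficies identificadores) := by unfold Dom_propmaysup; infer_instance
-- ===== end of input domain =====

-- B replaces A's fused running-max/index loop with two builtin scans (max, then first index); idiomatic, same cost.

-- ===== PORT A =====
-- literal port of A: mayor = superficies[0]; indice = 0; for i in range(1, len): update; return [mayor, identificadores[indice]]
def propmaysup (superficies : List Int) (identificadores : List Int) : List Int :=
  let mayor0 : Int := PySem.List.pyGetD superficies 0 0
  let st := (PySem.List.pyRange 1 (superficies.length : Int) 1).foldl
    (fun (st : Int × Int) (i : Int) =>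
      if PySem.List.pyGetD superficies i 0 > st.1 then (PySem.List.pyGetD superficies i 0, i) else st)
    (mayor0, 0)
  [st.1, PySem.List.pyGetD identificadores st.2 0]

-- ===== PORT B =====
-- literal port of B: mayor = max(superficies); indice = superficies.index(mayor); return [mayor, identificadores[indice]]
def propmaysup_alt (superficies : List Int) (identificadores : List Int) : List Int :=
  let mayor : Int := (PySem.List.max? superficies (fun y => y)).getD 0
  let indice : Nat := (PySem.List.index? superficies mayor).getD 0
  [mayor, PySem.List.pyGetD identificadores (indice : Int) 0]

-- ===== PRECONDITION & SPEC =====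
-- Pre_ excludes exactly the inputs where Python A raises: empty superficies (IndexError on superficies[0]),
-- and a first-argmax position that is out of range of identificadores (IndexError on identificadores[indice]).
def Pre_propmaysup (superficies : List Int) (identificadores : List Int) : Prop :=
  superficies ≠ [] ∧
    superficies.idxOf (superficies.tail.foldl max (superficies.headD 0)) < identificadores.length

instance (superficies : List Int) (identificadores : List Int) : Decidable (Pre_propmaysup superficies identificadores) := by
  unfold Pre_propmaysup; infer_instance

def pvWitness_propmaysup : List Int × List Int := ([3, 7, 7, 2], [10, 20, 30, 40])

def Spec_propmaysup (superficies : List Int) (identificadores : List Int) (out : List Int) : Prop := out = propmaysup_alt superficies identificadores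
instance (superficies : List Int) (identificadores : List Int) (out : List Int) : Decidable (Spec_propmaysup superficies identificadores out) := by unfold Spec_propmaysup; infer_instance

-- ===== CLAIM (what is proved, stated in full; the proofs are below) =====
def Claim_equal_propmaysup : Prop := ∀ (superficies : List Int) (identificadores : List Int), Dom_propmaysup superficies identificadores → Pre_propmaysup superficies identificadores → Spec_propmaysup superficies identificadores (propmaysup superficies identificadores)

-- ===== LEMMAS AND PROOFS =====

-- A's loop over indices 1..|x::t|-1 computes the running max and the index of its FIRST occurrence.
theorem fold_argmax (x : Int) (t : List Int) :
    (PySem.List.pyRange 1 ((x :: t).length : Int) 1).foldl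
      (fun (st : Int × Int) (i : Int) =>
        if PySem.List.pyGetD (x :: t) i 0 > st.1 then (PySem.List.pyGetD (x :: t) i 0, i) else st)
      (x, 0)
    = (t.foldl max x, (((PySem.List.index? (x :: t) (t.foldl max x)).getD 0 : Nat) : Int)) := by
  induction t using List.reverseRecOn with
  | nil =>
    simp [PySem.List.pyRange_one_eq_nil]
  | append_singleton t y ih =>
    have hlen : ((x :: (t ++ [y])).length : Int) = ((x :: t).length : Int) + 1 := by
      simp
    rw [hlen, PySem.List.pyRange_one_succ_right (by simp), List.foldl_append]
    -- the fold over the first part only touches indices < (x::t).length, where the two lists agree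
    have hcongr :
        (PySem.List.pyRange 1 ((x :: t).length : Int) 1).foldl
          (fun (st : Int × Int) (i : Int) =>
            if PySem.List.pyGetD (x :: (t ++ [y])) i 0 > st.1 then (PySem.List.pyGetD (x :: (t ++ [y])) i 0, i) else st)
          (x, 0)
        = (PySem.List.pyRange 1 ((x :: t).length : Int) 1).foldl
          (fun (st : Int × Int) (i : Int) =>
            if PySem.List.pyGetD (x :: t) i 0 > st.1 then (PySem.List.pyGetD (x :: t) i 0, i) else st)
          (x, 0) := by
      apply PySem.List.foldl_congr_mem
      intro acc i hi
      rw [PySem.List.mem_pyRange_one] at hi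
      have hi' : 1 ≤ i ∧ i < (t.length : Int) + 1 := by
        refine ⟨hi.1, ?_⟩
        have := hi.2; simp only [List.length_cons] at this; push_cast at this; omega
      have h0 : (0:Int) ≤ i := by omega
      have h1 : i < ((x :: (t ++ [y])).length : Int) := by
        simp only [List.length_cons, List.length_append]; push_cast; omega
      have h2 : i < ((x :: t).length : Int) := by
        simp only [List.length_cons]; push_cast; omega
      rw [PySem.List.pyGetD_eq_getElem _ _ h0 h1, PySem.List.pyGetD_eq_getElem _ _ h0 h2]
      have hget : (x :: (t ++ [y]))[i.toNat]'(by simp; omega) = (x :: t)[i.toNat]'(by simp; omega) :=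
        List.getElem_append_left (as := x :: t) (bs := [y]) (i := i.toNat) (by simp; omega)
      rw [hget]
    rw [hcongr, ih]
    -- the last step processes index (x::t).length, whose element is y
    have hylen : PySem.List.pyGetD (x :: (t ++ [y])) ((x :: t).length : Int) 0 = y := by
      rw [PySem.List.pyGetD_eq_getElem _ _ (by positivity) (by simp)]
      simp
    have hylen' : PySem.List.pyGetD (x :: (t ++ [y])) ((t.length : Int) + 1) 0 = y := by
      rwa [show ((x :: t).length : Int) = (t.length : Int) + 1 by simp] at hylen
    have hmax : (t ++ [y]).foldl max x = max (t.foldl max x) y := by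
      simp [List.foldl_append]
    have hle := PySem.List.le_foldl_max t x
    by_cases hgt : y > t.foldl max x
    · -- new maximum at the end: its first index is (x::t).length
      have hnot : y ∉ (x :: t) := by
        intro hmem
        rcases List.mem_cons.mp hmem with h | h
        · omega
        · exact absurd (hle.2 y h) (by omega)
      have hidx : PySem.List.index? (x :: (t ++ [y])) y = some (x :: t).length :=
        PySem.List.index?_append_singleton_self (x :: t) y hnot
      simp only [PySem.List.index?_eq_idxOf?] at hidx
      simp [hylen', hgt, hmax, max_eq_right (le_of_lt hgt), hidx]
    · -- maximum unchanged; first index unchanged since it occurs in x::t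
      have hmem : t.foldl max x ∈ (x :: t) := by
        rcases PySem.List.foldl_max_mem t x with h | h
        · rw [h]; exact List.mem_cons_self
        · exact List.mem_cons_of_mem _ h
      have hidx : PySem.List.index? ((x :: t) ++ [y]) (t.foldl max x) = PySem.List.index? (x :: t) (t.foldl max x) :=
        PySem.List.index?_append_of_mem _ hmem
      simp only [PySem.List.index?_eq_idxOf?, List.cons_append] at hidx
      simp [hylen', hgt, hmax, max_eq_left (show y ≤ t.foldl max x by omega), hidx]

-- ===== VERDICT (by name: the statement is the Claim_ definition above) =====
theorem propmaysup_spec : Claim_equal_propmaysup := by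
  intro superficies identificadores _ hpre
  match superficies with
  | [] => exact absurd hpre.1 (by simp)
  | x :: t =>
    show propmaysup (x :: t) identificadores = propmaysup_alt (x :: t) identificadores
    have h0 : PySem.List.pyGetD (x :: t) 0 0 = x := PySem.List.pyGetD_zero_cons x t 0
    simp only [propmaysup, propmaysup_alt, h0, fold_argmax x t, PySem.List.max?_id_cons]
    simp
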